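-- pv_equiv track=rewrite | github.com/VoiceofSiren/StudyingProgramming | Python/Coding Test/Programmers/lv0/p-104.py | solution
-- ===== SOURCE A (Python) =====
-- def solution(arr):
--     answer = 0
--     while True:
--         arr1 = [
--             i for i in arr
--         ]
--         arr2 = operation(arr1)
--         if not equals(arr1, arr2):
--             answer += 1
--             arr = arr2
--         else:
--             break
--     return answer
--
-- def operation(arr):
--     new_arr = [
--         i for i in arr
--     ]
--     for i in range(len(new_arr)):
--         if new_arr[i] >= 50 and new_arr[i]%2 == 0:
--             new_arr[i] //= 2
--         elif new_arr[i] < 50 and new_arr[i]%2 == 1: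
--             new_arr[i] = new_arr[i] * 2 + 1
--     return new_arr
--
-- def equals(arr1, arr2):
--     result = True
--     for i in range(len(arr1)):
--         if arr1[i] != arr2[i]:
--             result = False
--     return result
-- ===== SOURCE B (Python) =====
-- def solution(arr):
--     best = 0
--     for x in arr:
--         steps = 0
--         while True:
--             if x >= 50 and x % 2 == 0:
--                 y = x // 2
--             elif x < 50 and x % 2 == 1:
--                 y = x * 2 + 1
--             else:
--                 y = x
--             if y == x:
--                 break
--             x = y
--             steps += 1
--         best = max(best, steps)
--     return best
-- ===== Notes on version B (the rewrite author's own statement) =====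
-- stated objective: simpler
-- what changed: B counts, for each element independently, the steps to its fixed point and returns the maximum, replacing A's whole-array rounds with per-round list copies and an equals scan.
import Mathlib
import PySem

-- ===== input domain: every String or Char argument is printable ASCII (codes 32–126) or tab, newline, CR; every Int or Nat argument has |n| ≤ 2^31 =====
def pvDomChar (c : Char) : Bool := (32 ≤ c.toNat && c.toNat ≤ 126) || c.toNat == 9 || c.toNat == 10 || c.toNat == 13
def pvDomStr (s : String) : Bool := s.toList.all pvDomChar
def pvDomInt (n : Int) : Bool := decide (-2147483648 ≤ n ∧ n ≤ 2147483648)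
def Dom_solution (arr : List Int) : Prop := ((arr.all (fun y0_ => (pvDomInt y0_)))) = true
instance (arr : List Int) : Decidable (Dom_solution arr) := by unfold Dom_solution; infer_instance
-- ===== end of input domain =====

-- B replaces A's whole-array rounds (copy + operation + equals scan per round) by independent
-- per-element convergence counting (max of the per-element step counts): simpler, no array copies.
-- Both Pythons loop forever on an element that is odd and < -1 (it keeps changing under 2*x+1).
-- Both ports carry the same fuel parameter (100, ample for |x| ≤ 2^31 whenever the Pythons
-- terminate) solely to make the loops total; the equivalence is proved for the fuelled programs.

-- ===== PORT A =====
-- operation: the Python for-loop writes only index i from index i, ported as the elementwise map.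
def opElemA (v : Int) : Int :=
  if 50 ≤ v ∧ PySem.Int.mod v 2 = 0 then PySem.Int.floordiv v 2
  else if v < 50 ∧ PySem.Int.mod v 2 = 1 then v * 2 + 1
  else v

def operationA (arr : List Int) : List Int := arr.map opElemA

-- equals: fold over range(len(arr1)), result set to False on any mismatch.
def equalsA (arr1 arr2 : List Int) : Bool :=
  (List.range arr1.length).foldl
    (fun r i => if arr1.getD i 0 ≠ arr2.getD i 0 then false else r) true

def loopA : Nat → List Int → Int → Int
  | 0, _, answer => answer
  | f + 1, arr, answer =>
    let arr1 := arr
    let arr2 := operationA arr1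
    if equalsA arr1 arr2 = false then loopA f arr2 (answer + 1) else answer

def solution (arr : List Int) : Int := loopA 100 arr 0

-- ===== PORT B =====
def stepB (x : Int) : Int :=
  if 50 ≤ x ∧ PySem.Int.mod x 2 = 0 then PySem.Int.floordiv x 2
  else if x < 50 ∧ PySem.Int.mod x 2 = 1 then x * 2 + 1
  else x

def countB : Nat → Int → Int → Int
  | 0, _, steps => steps
  | f + 1, x, steps =>
    let y := stepB x
    if y = x then steps else countB f y (steps + 1)

def solution_alt (arr : List Int) : Int :=
  arr.foldl (fun best x => max best (countB 100 x 0)) 0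

-- ===== PRECONDITION & SPEC =====
def Spec_solution (arr : List Int) (out : Int) : Prop := out = solution_alt arr
instance (arr : List Int) (out : Int) : Decidable (Spec_solution arr out) := by unfold Spec_solution; infer_instance

-- ===== CLAIM (what is proved, stated in full; the proofs are below) =====
def Claim_equal_solution : Prop := ∀ (arr : List Int), Dom_solution arr → Spec_solution arr (solution arr)

-- ===== LEMMAS AND PROOFS =====

theorem stepB_eq_opElemA (x : Int) : stepB x = opElemA x := rfl

theorem countB_shift (f : Nat) : ∀ (x s : Int), countB f x s = s + countB f x 0 := by
  induction f with
  | zero => intro x s; simp [countB]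
  | succ f ih =>
    intro x s
    simp only [countB]
    by_cases h : stepB x = x
    · simp [h]
    · rw [if_neg h, if_neg h, ih (stepB x) (s + 1), ih (stepB x) (0 + 1)]
      ring

theorem countB_nonneg (f : Nat) : ∀ x : Int, 0 ≤ countB f x 0 := by
  induction f with
  | zero => intro x; simp [countB]
  | succ f ih =>
    intro x
    simp only [countB]
    by_cases h : stepB x = x
    · simp [h]
    · simp only [if_neg h]
      rw [countB_shift]
      have := ih (stepB x)
      omega

theorem countB_fixed (f : Nat) (x : Int) (h : stepB x = x) : countB f x 0 = 0 := by
  cases f <;> simp [countB, h]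

theorem countB_succ (f : Nat) (x : Int) :
    countB (f + 1) x 0 = if stepB x = x then 0 else 1 + countB f (stepB x) 0 := by
  simp only [countB]
  by_cases h : stepB x = x
  · simp [h]
  · simp only [if_neg h]
    rw [countB_shift]
    ring

-- equalsA characterisation
theorem foldl_false (p : Nat → Prop) [DecidablePred p] :
    ∀ l : List Nat, l.foldl (fun r i => if p i then false else r) false = false := by
  intro l
  induction l with
  | nil => rfl
  | cons i l ih => simp only [List.foldl]; split <;> exact ih

theorem foldl_eq_true (p : Nat → Prop) [DecidablePred p] :
    ∀ l : List Nat, (l.foldl (fun r i => if p i then false else r) true = true) ↔ ∀ i ∈ l, ¬ p i := by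
  intro l
  induction l with
  | nil => simp
  | cons i l ih =>
    simp only [List.foldl]
    by_cases h : p i
    · rw [if_pos h, foldl_false]
      simp [h]
    · rw [if_neg h, ih]
      simp [h]

theorem equalsA_true_iff (arr : List Int) :
    equalsA arr (operationA arr) = true ↔ ∀ x ∈ arr, opElemA x = x := by
  unfold equalsA
  rw [foldl_eq_true (fun i => arr.getD i 0 ≠ (operationA arr).getD i 0)]
  constructor
  · intro h x hx
    obtain ⟨i, hi, rfl⟩ := List.mem_iff_getElem.mp hx
    have := h i (List.mem_range.mpr hi)
    simp only [not_not] at this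
    unfold operationA at this
    rw [List.getD_eq_getElem _ _ hi, List.getD_eq_getElem _ _ (by simpa using hi)] at this
    simp only [List.getElem_map] at this
    exact this.symm
  · intro h i hi
    have hi' := List.mem_range.mp hi
    simp only [not_not]
    unfold operationA
    rw [List.getD_eq_getElem _ _ hi', List.getD_eq_getElem _ _ (by simpa using hi')]
    simp only [List.getElem_map]
    exact (h _ (List.getElem_mem hi')).symm

-- the max-fold relation lemma
theorem fold_rel (φ ψ : Int → Int) (c : Int → Prop) [DecidablePred c]
    (hφ : ∀ x, 0 ≤ φ x) (hψ : ∀ x, ψ x = if c x then 0 else 1 + φ x)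
    (hc : ∀ x, c x → φ x = 0) :
    ∀ (arr : List Int) (a b : Int), 0 ≤ b →
      (a = 1 + b ∨ (0 ≤ a ∧ a ≤ 1 ∧ b = 0)) →
      (a = 1 + b ∨ ∃ x ∈ arr, ¬ c x) →
      arr.foldl (fun acc x => max acc (ψ x)) a = 1 + arr.foldl (fun acc x => max acc (φ x)) b := by
  intro arr
  induction arr with
  | nil =>
    intro a b _ _ hend
    rcases hend with h | h
    · simpa using h
    · simp at h
  | cons x l ih =>
    intro a b hb hinv hend
    simp only [List.foldl]
    by_cases hcx : c x
    · have hφx : φ x = 0 := hc x hcx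
      have hψx : ψ x = 0 := by rw [hψ x]; simp [hcx]
      rw [hψx, hφx]
      have hbmax : max b 0 = b := by omega
      rw [hbmax]
      rcases hinv with h | h
      · apply ih (max a 0) b hb (Or.inl (by omega))
        rcases hend with h2 | h2
        · exact Or.inl (by omega)
        · rcases h2 with ⟨y, hy, hyc⟩
          rcases List.mem_cons.mp hy with rfl | hy'
          · exact absurd hcx hyc
          · exact Or.inr ⟨y, hy', hyc⟩
      · apply ih (max a 0) b hb (Or.inr (by omega))
        rcases hend with h2 | h2
        · exact Or.inl (by omega)
        · rcases h2 with ⟨y, hy, hyc⟩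
          rcases List.mem_cons.mp hy with rfl | hy'
          · exact absurd hcx hyc
          · exact Or.inr ⟨y, hy', hyc⟩
    · have hψx : ψ x = 1 + φ x := by rw [hψ x]; simp [hcx]
      rw [hψx]
      have hφx := hφ x
      have hkey : max a (1 + φ x) = 1 + max b (φ x) := by omega
      rw [hkey]
      exact ih _ _ (by omega) (Or.inl rfl) (Or.inl rfl)

theorem fold_zero (f : Int → Int) :
    ∀ (arr : List Int), (∀ x ∈ arr, f x = 0) → arr.foldl (fun acc x => max acc (f x)) 0 = 0 := by
  intro arr
  induction arr with
  | nil => intro _; rfl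
  | cons x l ih =>
    intro h
    simp only [List.foldl]
    rw [h x (List.mem_cons_self), max_self]
    exact ih (fun y hy => h y (List.mem_cons_of_mem _ hy))

theorem loopA_eq (f : Nat) :
    ∀ (arr : List Int) (ans : Int),
      loopA f arr ans = ans + arr.foldl (fun best x => max best (countB f x 0)) 0 := by
  induction f with
  | zero =>
    intro arr ans
    simp only [loopA]
    rw [fold_zero _ arr (fun x _ => by simp [countB])]
    ring
  | succ f ih =>
    intro arr ans
    simp only [loopA]
    by_cases h : ∀ x ∈ arr, opElemA x = x
    · rw [if_neg (by simp [(equalsA_true_iff arr).mpr h])]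
      rw [fold_zero _ arr (fun x hx => countB_fixed _ x (by rw [stepB_eq_opElemA]; exact h x hx))]
      ring
    · have hne : equalsA arr (operationA arr) = false := by
        rcases Bool.eq_false_or_eq_true (equalsA arr (operationA arr)) with ht | hf
        · exact absurd ((equalsA_true_iff arr).mp ht) h
        · exact hf
      rw [if_pos hne, ih (operationA arr) (ans + 1)]
      have hrel :
          arr.foldl (fun best x => max best (countB (f + 1) x 0)) 0
            = 1 + (operationA arr).foldl (fun best x => max best (countB f x 0)) 0 := by
        unfold operationA
        rw [List.foldl_map]
        rw [not_forall] at h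
        obtain ⟨y, hy⟩ := h
        rw [Classical.not_imp] at hy
        apply fold_rel (fun x => countB f (opElemA x) 0) (fun x => countB (f + 1) x 0)
          (fun x => opElemA x = x)
        · intro x; exact countB_nonneg f _
        · intro x
          rw [countB_succ, stepB_eq_opElemA]
        · intro x hx
          exact countB_fixed f _ (by rw [stepB_eq_opElemA, hx]; exact hx)
        · omega
        · right; omega
        · exact Or.inr ⟨y, hy.1, hy.2⟩
      rw [hrel]
      ring

-- ===== VERDICT (by name: the statement is the Claim_ definition above) =====
theorem solution_spec : Claim_equal_solution := by
  intro arr _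
  unfold Spec_solution solution solution_alt
  rw [loopA_eq]
  ring
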